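-- pv_equiv track=rewrite | github.com/compute-tooling/compute-studio | webapp/apps/comp/displayer.py | _parse_top_level
-- ===== SOURCE A (Python) =====
-- def _parse_top_level(ordered_dict):
--     output = []
--     for x, y in ordered_dict.items():
--         section_name = y.get("section_1", " ")
--         if section_name:
--             section = next((item for item in output if section_name in item), None)
--             if not section:
--                 output.append({section_name: [{x: y}]})
--             else:
--                 section[section_name].append({x: y})
--     return output
-- ===== SOURCE B (Python) =====
-- def _parse_top_level(ordered_dict):
--     items = list(ordered_dict.items())
--     seen = []
--     for x, y in items:
--         s = y.get("section_1", " ")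
--         if s:
--             if s not in seen:
--                 seen.append(s)
--     return [
--         {s: [{x: y} for x, y in items if y.get("section_1", " ") == s]}
--         for s in seen
--     ]
-- ===== Notes on version B (the rewrite author's own statement) =====
-- stated objective: alternative
-- what changed: Replaces A's incremental find-or-create maintenance of the output (per-item next(...) scan and in-place append) by two staged passes: first collect the distinct truthy section names in first-occurrence order, then emit each section's dict with a full-list comprehension filtering the items that belong to it; no partial output is ever mutated.
import Mathlib
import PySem

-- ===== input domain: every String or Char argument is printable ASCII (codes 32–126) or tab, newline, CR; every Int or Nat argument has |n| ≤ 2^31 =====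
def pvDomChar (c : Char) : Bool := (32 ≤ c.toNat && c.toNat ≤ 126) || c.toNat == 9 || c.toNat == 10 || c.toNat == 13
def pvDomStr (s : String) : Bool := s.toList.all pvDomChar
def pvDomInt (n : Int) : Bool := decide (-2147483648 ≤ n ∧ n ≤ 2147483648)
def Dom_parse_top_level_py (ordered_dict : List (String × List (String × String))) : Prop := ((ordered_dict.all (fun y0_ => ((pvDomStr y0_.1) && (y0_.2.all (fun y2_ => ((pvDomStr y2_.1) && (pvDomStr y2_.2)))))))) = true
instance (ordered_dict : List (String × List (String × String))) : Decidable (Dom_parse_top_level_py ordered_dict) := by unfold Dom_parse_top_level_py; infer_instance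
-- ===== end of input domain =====

-- B replaces A's incremental find-or-create maintenance of the output by two staged passes:
-- collect distinct truthy section names in first-occurrence order, then emit each section by
-- filtering the whole item list (alternative decomposition; same results, no mutation of output).


-- y.get("section_1", " ")  (shared by both ports; both Pythons compute exactly this)
def pvSec (xy : String × List (String × String)) : String :=
  PySem.Dict.getD (PySem.Dict.ofList xy.2) "section_1" " "

-- ===== PORT A =====
-- one loop iteration's update of `output`: scan for the first section dict containing the key
-- `s` ("section_name in item"); mutate its list in place, or append a fresh {s: [it]} at the end
def pvAddSection (s : String) (it : List (String × List (String × String))) :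
    List (List (String × List (List (String × List (String × String))))) →
    List (List (String × List (List (String × List (String × String)))))
  | [] => [[(s, [it])]]
  | d :: rest =>
    if d.any (fun p => p.1 == s) then
      (d.map (fun p => if p.1 == s then (p.1, p.2 ++ [it]) else p)) :: rest
    else d :: pvAddSection s it rest

def parse_top_level_py (ordered_dict : List (String × List (String × String))) : List (List (String × List (List (String × List (String × String))))) :=
  ordered_dict.foldl
    (fun output xy =>
      let section_name := pvSec xy
      if section_name = "" then output
      else pvAddSection section_name [(xy.1, xy.2)] output)
    []

-- ===== PORT B =====
-- pass 1: distinct truthy section names, in first-occurrence order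
def pvNames (ordered_dict : List (String × List (String × String))) : List String :=
  ordered_dict.foldl
    (fun seen xy =>
      let s := pvSec xy
      if s = "" then seen
      else if s ∈ seen then seen else seen ++ [s])
    []

-- pass 2 body: [{x: y} for x, y in items if y.get("section_1", " ") == s]
def pvFilt (ordered_dict : List (String × List (String × String))) (s : String) :
    List (List (String × List (String × String))) :=
  ordered_dict.filterMap (fun xy => if pvSec xy = s then some [(xy.1, xy.2)] else none)

def parse_top_level_py_alt (ordered_dict : List (String × List (String × String))) : List (List (String × List (List (String × List (String × String))))) :=
  (pvNames ordered_dict).map (fun s => [(s, pvFilt ordered_dict s)])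

-- ===== PRECONDITION & SPEC =====
def Spec_parse_top_level_py (ordered_dict : List (String × List (String × String))) (out : List (List (String × List (List (String × List (String × String)))))) : Prop := out = parse_top_level_py_alt ordered_dict
instance (ordered_dict : List (String × List (String × String))) (out : List (List (String × List (List (String × List (String × String)))))) : Decidable (Spec_parse_top_level_py ordered_dict out) := by
  unfold Spec_parse_top_level_py
  exact @instDecidableEqList _ (@instDecidableEqList _ (@instDecidableEqProd _ _ inferInstance
    (@instDecidableEqList _ (@instDecidableEqList _ (@instDecidableEqProd _ _ inferInstance
      inferInstance))))) out (parse_top_level_py_alt ordered_dict)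

-- ===== CLAIM (what is proved, stated in full; the proofs are below) =====
def Claim_equal_parse_top_level_py : Prop := ∀ (ordered_dict : List (String × List (String × String))), Dom_parse_top_level_py ordered_dict → Spec_parse_top_level_py ordered_dict (parse_top_level_py ordered_dict)

-- ===== LEMMAS AND PROOFS =====

-- membership characterisation of pass 1 (generalised over the accumulator)
lemma pvNames_mem_aux (od : List (String × List (String × String))) (acc : List String) (t : String) :
    t ∈ od.foldl
        (fun seen xy =>
          let s := pvSec xy
          if s = "" then seen else if s ∈ seen then seen else seen ++ [s])
        acc ↔ t ∈ acc ∨ (t ≠ "" ∧ ∃ xy ∈ od, pvSec xy = t) := by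
  induction od generalizing acc with
  | nil => simp
  | cons xy od ih =>
    simp only [List.foldl_cons, ih, List.mem_cons]
    by_cases h0 : pvSec xy = ""
    · simp only [h0, if_true]
      constructor
      · rintro (h | ⟨ht, z, hz, hs⟩)
        · exact Or.inl h
        · exact Or.inr ⟨ht, z, Or.inr hz, hs⟩
      · rintro (h | ⟨ht, z, (rfl | hz), hs⟩)
        · exact Or.inl h
        · exact absurd (hs.symm.trans h0) ht
        · exact Or.inr ⟨ht, z, hz, hs⟩
    · by_cases hm : pvSec xy ∈ acc
      · simp only [h0, if_false, hm, if_true]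
        constructor
        · rintro (h | ⟨ht, z, hz, hs⟩)
          · exact Or.inl h
          · exact Or.inr ⟨ht, z, Or.inr hz, hs⟩
        · rintro (h | ⟨ht, z, (rfl | hz), hs⟩)
          · exact Or.inl h
          · exact Or.inl (hs ▸ hm)
          · exact Or.inr ⟨ht, z, hz, hs⟩
      · simp only [h0, if_false, hm, List.mem_append, List.mem_singleton]
        constructor
        · rintro ((h | h) | ⟨ht, z, hz, hs⟩)
          · exact Or.inl h
          · exact Or.inr ⟨h ▸ h0, xy, Or.inl rfl, h.symm⟩
          · exact Or.inr ⟨ht, z, Or.inr hz, hs⟩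
        · rintro (h | ⟨ht, z, (rfl | hz), hs⟩)
          · exact Or.inl (Or.inl h)
          · exact Or.inl (Or.inr hs.symm)
          · exact Or.inr ⟨ht, z, hz, hs⟩

lemma pvNames_mem (od : List (String × List (String × String))) (t : String) :
    t ∈ pvNames od ↔ t ≠ "" ∧ ∃ xy ∈ od, pvSec xy = t := by
  simpa using pvNames_mem_aux od [] t

lemma pvNames_nodup_aux (od : List (String × List (String × String))) (acc : List String)
    (h : acc.Nodup) :
    (od.foldl
        (fun seen xy =>
          let s := pvSec xy
          if s = "" then seen else if s ∈ seen then seen else seen ++ [s])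
        acc).Nodup := by
  induction od generalizing acc with
  | nil => exact h
  | cons xy od ih =>
    simp only [List.foldl_cons]
    by_cases h0 : pvSec xy = ""
    · simp only [h0, if_true]; exact ih _ h
    · by_cases hm : pvSec xy ∈ acc
      · simp only [h0, if_false, hm, if_true]; exact ih _ h
      · simp only [h0, if_false, hm]
        refine ih _ ?_
        simp only [List.nodup_append, List.nodup_singleton, true_and, h, List.mem_singleton]
        intro a ha b hb he
        exact hm ((he.trans hb) ▸ ha)

lemma pvNames_nodup (od : List (String × List (String × String))) : (pvNames od).Nodup :=
  pvNames_nodup_aux od [] List.nodup_nil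

-- snoc form of pass 1
lemma pvNames_snoc (od : List (String × List (String × String))) (xy : String × List (String × String)) :
    pvNames (od ++ [xy]) =
      (if pvSec xy = "" then pvNames od
       else if pvSec xy ∈ pvNames od then pvNames od else pvNames od ++ [pvSec xy]) := by
  simp [pvNames, List.foldl_append]

-- snoc form of pass 2
lemma pvFilt_snoc (od : List (String × List (String × String))) (xy : String × List (String × String)) (s : String) :
    pvFilt (od ++ [xy]) s =
      pvFilt od s ++ (if pvSec xy = s then [[(xy.1, xy.2)]] else []) := by
  by_cases h : pvSec xy = s <;> simp [pvFilt, List.filterMap_append, h]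

lemma pvFilt_nil_of_not_mem (od : List (String × List (String × String))) (s : String)
    (hs : s ≠ "") (h : s ∉ pvNames od) : pvFilt od s = [] := by
  rw [pvFilt, List.filterMap_eq_nil_iff]
  intro xy hxy
  by_cases he : pvSec xy = s
  · exact absurd ((pvNames_mem od s).2 ⟨hs, xy, hxy, he⟩) h
  · simp [he]

-- A's step on the rendered form: fresh section appended at the end
lemma pvAddSection_not_mem (s : String) (it : List (String × List (String × String)))
    (l : List String) (F : String → List (List (String × List (String × String))))
    (h : s ∉ l) :
    pvAddSection s it (l.map (fun t => [(t, F t)])) =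
      l.map (fun t => [(t, F t)]) ++ [[(s, [it])]] := by
  induction l with
  | nil => rfl
  | cons t l ih =>
    have hts : ¬ t = s := fun he => h (he ▸ List.mem_cons_self ..)
    simp only [List.map_cons, pvAddSection, List.any_cons, List.any_nil, Bool.or_false]
    rw [if_neg (by simpa using hts), ih (fun hm => h (List.mem_cons_of_mem _ hm))]
    rfl

-- A's step on the rendered form: existing section updated in place
lemma pvAddSection_mem (s : String) (it : List (String × List (String × String)))
    (l : List String) (F : String → List (List (String × List (String × String))))
    (hnd : l.Nodup) (h : s ∈ l) :
    pvAddSection s it (l.map (fun t => [(t, F t)])) =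
      l.map (fun t => [(t, if t = s then F t ++ [it] else F t)]) := by
  induction l with
  | nil => cases h
  | cons t l ih =>
    by_cases hts : t = s
    · subst hts
      have hnotin : t ∉ l := (List.nodup_cons.1 hnd).1
      simp only [List.map_cons, pvAddSection, List.any_cons, List.any_nil, Bool.or_false,
        beq_self_eq_true, if_true, List.map_cons, List.map_nil]
      congr 1
      exact List.map_congr_left (fun u hu => by
        have : ¬ u = t := fun he => hnotin (he ▸ hu)
        simp [this])
    · rcases List.mem_cons.1 h with rfl | hm
      · exact absurd rfl hts
      simp only [List.map_cons, pvAddSection, List.any_cons, List.any_nil, Bool.or_false]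
      rw [if_neg (by simpa using hts), ih (List.nodup_cons.1 hnd).2 hm, if_neg hts]

-- main invariant: A's output is B's names rendered with B's filters
lemma pvMain (od : List (String × List (String × String))) :
    parse_top_level_py od = (pvNames od).map (fun s => [(s, pvFilt od s)]) := by
  induction od using List.reverseRecOn with
  | nil => rfl
  | append_singleton od xy ih =>
    have hA : parse_top_level_py (od ++ [xy]) =
        (if pvSec xy = "" then parse_top_level_py od
         else pvAddSection (pvSec xy) [(xy.1, xy.2)] (parse_top_level_py od)) := by
      simp only [parse_top_level_py, List.foldl_append, List.foldl_cons, List.foldl_nil]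
    rw [hA, ih, pvNames_snoc]
    by_cases h0 : pvSec xy = ""
    · simp only [h0, if_true]
      exact List.map_congr_left (fun t ht => by
        have ht' := (pvNames_mem od t).1 ht
        have : pvSec xy ≠ t := fun he => ht'.1 (he.symm.trans h0)
        rw [pvFilt_snoc]
        simp [this])
    · simp only [h0, if_false]
      by_cases hm : pvSec xy ∈ pvNames od
      · simp only [hm, if_true]
        rw [pvAddSection_mem _ _ _ _ (pvNames_nodup od) hm]
        exact List.map_congr_left (fun t _ => by
          rw [pvFilt_snoc]
          by_cases hts : t = pvSec xy
          · simp [hts]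
          · have : pvSec xy ≠ t := fun he => hts he.symm
            simp [hts, this])
      · simp only [hm, if_false]
        rw [pvAddSection_not_mem _ _ _ _ hm, List.map_append]
        congr 1
        · exact List.map_congr_left (fun t ht => by
            have : pvSec xy ≠ t := fun he => hm (he ▸ ht)
            rw [pvFilt_snoc]
            simp [this])
        · rw [List.map_singleton, pvFilt_snoc, pvFilt_nil_of_not_mem od _ h0 hm]
          simp

-- ===== VERDICT (by name: the statement is the Claim_ definition above) =====
theorem parse_top_level_py_spec : Claim_equal_parse_top_level_py := by
  intro od _
  show parse_top_level_py od = parse_top_level_py_alt od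
  rw [pvMain, parse_top_level_py_alt]
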